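-- pv_equiv track=rewrite | github.com/DynamicCodeSearch/SLACC | simple/src/main/python/Y14R5P1/Smithers/generated_py_263a1af396df4e8fa1f96950f5309feb.py | func_52bc3fb7c58c4b9faa78d9f42ca9a8cd
-- ===== SOURCE A (Python) =====
-- def func_52bc3fb7c58c4b9faa78d9f42ca9a8cd(s, p, r, n, q):
--     dev = [((i * p + q) % r + s) for i in range(n)]
--     tot = sum(dev)
--     i = 0
--     j = n - 1
--     ltot = 0
--     mtot = tot
--     rtot = 0
--     best = 0
--     return tot
-- ===== SOURCE B (Python) =====
-- def _floor_sum(n, m, a, b):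
--     # sum((a*i + b) // m for i in range(n)) for m > 0, n >= 0, in O(log) steps
--     ans = 0
--     if a < 0 or a >= m:
--         ans += (a // m) * (n * (n - 1) // 2)
--         a %= m
--     if b < 0 or b >= m:
--         ans += (b // m) * n
--         b %= m
--     y = a * n + b
--     if y < m:
--         return ans
--     return ans + _floor_sum(y // m, a, m, y % m)
--
--
-- def _mod_sum(p, q, r, n):
--     # sum((i*p + q) % r for i in range(n)) for r > 0
--     return p * (n * (n - 1) // 2) + q * n - r * _floor_sum(n, r, p, q)
--
--
-- def func_52bc3fb7c58c4b9faa78d9f42ca9a8cd(s, p, r, n, q):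
--     if n <= 0:
--         return 0
--     if r < 0:
--         # x % r == -((-x) % (-r)) for r < 0
--         msum = -_mod_sum(-p, -q, -r, n)
--     else:
--         msum = _mod_sum(p, q, r, n)
--     return msum + s * n
-- ===== Notes on version B (the rewrite author's own statement) =====
-- stated objective: faster
-- what changed: A sums ((i*p+q) % r + s) over all i < n in a list comprehension; B computes the same total in closed form, reducing the modular sum to a Gauss term minus r times sum of floor((p*i+q)/r), which it evaluates with the Euclidean floor-sum recursion in O(log) arithmetic steps.
import Mathlib
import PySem

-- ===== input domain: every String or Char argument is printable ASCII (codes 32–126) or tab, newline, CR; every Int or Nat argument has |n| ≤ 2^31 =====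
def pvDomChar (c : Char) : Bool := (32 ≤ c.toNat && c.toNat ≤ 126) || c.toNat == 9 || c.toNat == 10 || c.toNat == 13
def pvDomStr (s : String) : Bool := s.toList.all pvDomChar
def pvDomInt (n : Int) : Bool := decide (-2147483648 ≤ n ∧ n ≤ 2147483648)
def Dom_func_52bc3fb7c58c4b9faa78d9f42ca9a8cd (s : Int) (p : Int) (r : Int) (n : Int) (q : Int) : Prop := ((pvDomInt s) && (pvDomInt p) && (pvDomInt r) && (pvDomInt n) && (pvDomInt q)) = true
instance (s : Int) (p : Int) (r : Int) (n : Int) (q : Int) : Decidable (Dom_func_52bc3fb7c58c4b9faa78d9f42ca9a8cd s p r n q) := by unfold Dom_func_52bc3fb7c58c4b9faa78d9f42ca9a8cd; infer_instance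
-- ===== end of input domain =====

-- B replaces A's O(n) loop summing ((i*p+q) % r + s) by a closed form plus an
-- O(log) Euclidean floor-sum recursion for sum of floor((a*i+b)/m); objective: faster.

-- ===== PORT A =====
def func_52bc3fb7c58c4b9faa78d9f42ca9a8cd (s : Int) (p : Int) (r : Int) (n : Int) (q : Int) : Int :=
  let dev := (PySem.List.pyRange 0 n 1).map (fun i => PySem.Int.mod (i * p + q) r + s)
  let tot := dev.foldl (· + ·) 0  -- Python's sum() is a left fold; List.sum's foldr overflows the stack on long lists
  let _i : Int := 0
  let _j : Int := n - 1
  let _ltot : Int := 0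
  let _mtot : Int := tot
  let _rtot : Int := 0
  let _best : Int := 0
  tot

-- ===== PORT B =====
-- sum((a*i + b) // m for i in range(n)) for m > 0, n ≥ 0, in O(log) steps (Source B's _floor_sum).
-- The recursion strictly decreases the (positive) modulus m, so a fuel of |m|+1 never
-- runs out; the fuel-0 and m ≤ 0 cases only make the recursion total: they are never
-- reached under Pre_ (Python raises ZeroDivisionError on r = 0, exactly as A does).
def pyFloorSumGo : Nat → Int → Int → Int → Int → Int
  | 0, _, _, _, _ => 0
  | fuel + 1, n, m, a, b =>
    if m ≤ 0 then 0
    else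
      let ans1 := if a < 0 ∨ m ≤ a then PySem.Int.floordiv a m * PySem.Int.floordiv (n * (n - 1)) 2 else 0
      let a1 := if a < 0 ∨ m ≤ a then PySem.Int.mod a m else a
      let ans2 := if b < 0 ∨ m ≤ b then ans1 + PySem.Int.floordiv b m * n else ans1
      let b1 := if b < 0 ∨ m ≤ b then PySem.Int.mod b m else b
      let y := a1 * n + b1
      if y < m then ans2
      else ans2 + pyFloorSumGo fuel (PySem.Int.floordiv y m) a1 m (PySem.Int.mod y m)

def pyFloorSumB (n m a b : Int) : Int := pyFloorSumGo (m.natAbs + 1) n m a b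

-- sum((i*p + q) % r for i in range(n)) for r > 0 (Source B's _mod_sum)
def pyModSumB (p q r n : Int) : Int :=
  p * PySem.Int.floordiv (n * (n - 1)) 2 + q * n - r * pyFloorSumB n r p q

def func_52bc3fb7c58c4b9faa78d9f42ca9a8cd_alt (s : Int) (p : Int) (r : Int) (n : Int) (q : Int) : Int :=
  if n ≤ 0 then 0
  else
    let msum := if r < 0 then -(pyModSumB (-p) (-q) (-r) n) else pyModSumB p q r n
    msum + s * n

-- ===== PRECONDITION & SPEC =====
-- Pre_ excludes r = 0 with n ≥ 1, where A raises ZeroDivisionError.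
def Pre_func_52bc3fb7c58c4b9faa78d9f42ca9a8cd (s : Int) (p : Int) (r : Int) (n : Int) (q : Int) : Prop := n ≤ 0 ∨ r ≠ 0
instance (s : Int) (p : Int) (r : Int) (n : Int) (q : Int) : Decidable (Pre_func_52bc3fb7c58c4b9faa78d9f42ca9a8cd s p r n q) := by unfold Pre_func_52bc3fb7c58c4b9faa78d9f42ca9a8cd; infer_instance

def pvWitness_func_52bc3fb7c58c4b9faa78d9f42ca9a8cd : Int × Int × Int × Int × Int := (1, 2, 3, 4, 5)

def Spec_func_52bc3fb7c58c4b9faa78d9f42ca9a8cd (s : Int) (p : Int) (r : Int) (n : Int) (q : Int) (out : Int) : Prop := out = func_52bc3fb7c58c4b9faa78d9f42ca9a8cd_alt s p r n q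
instance (s : Int) (p : Int) (r : Int) (n : Int) (q : Int) (out : Int) : Decidable (Spec_func_52bc3fb7c58c4b9faa78d9f42ca9a8cd s p r n q out) := by unfold Spec_func_52bc3fb7c58c4b9faa78d9f42ca9a8cd; infer_instance

-- ===== CLAIM (what is proved, stated in full; the proofs are below) =====
def Claim_equal_func_52bc3fb7c58c4b9faa78d9f42ca9a8cd : Prop := ∀ (s : Int) (p : Int) (r : Int) (n : Int) (q : Int), Dom_func_52bc3fb7c58c4b9faa78d9f42ca9a8cd s p r n q → Pre_func_52bc3fb7c58c4b9faa78d9f42ca9a8cd s p r n q → Spec_func_52bc3fb7c58c4b9faa78d9f42ca9a8cd s p r n q (func_52bc3fb7c58c4b9faa78d9f42ca9a8cd s p r n q)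


-- ===== LEMMAS AND PROOFS =====

-- Gauss sum over Finset.range, as an Int ediv equality.
theorem pvGauss (n : Int) (hn : 0 ≤ n) :
    ∑ i ∈ Finset.range n.toNat, (i : Int) = (n * (n - 1)) / 2 := by
  obtain ⟨N, rfl⟩ := Int.eq_ofNat_of_zero_le hn
  have h2 : (∑ i ∈ Finset.range N, (i : Int)) * 2 = (N : Int) * ((N : Int) - 1) := by
    have h := Finset.sum_range_id_mul_two N
    cases N with
    | zero => simp
    | succ k =>
      have hthis : (∑ i ∈ Finset.range (k+1), i) * 2 = (k+1) * k := by simpa using h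
      have h' : (∑ i ∈ Finset.range (k+1), (i : ℤ)) * 2 = ((k:ℤ)+1) * k := by
        have := congrArg (fun x : ℕ => (x : ℤ)) hthis
        push_cast at this
        linear_combination this
      rw [Nat.cast_add_one]
      linear_combination h'
  rw [Int.toNat_natCast, ← h2, Int.mul_ediv_cancel _ (by norm_num)]

-- list-sum over a pyRange as a Finset sum
theorem pvSumPyRange (n : Int) (f : Int → Int) :
    ((PySem.List.pyRange 0 n 1).map f).sum = ∑ i ∈ Finset.range n.toNat, f i := by
  rw [PySem.List.pyRange_one]
  have key : ∀ N : ℕ, (List.map f (List.map (fun k => (0:ℤ) + ↑k) (List.range N))).sum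
      = ∑ i ∈ Finset.range N, f ↑i := by
    intro N
    induction N with
    | zero => simp
    | succ k ih =>
      rw [List.range_succ, Finset.sum_range_succ, ← ih]
      simp
  have := key n.toNat
  simpa using this

-- a Nat division as a count of multiples below the value
theorem pvCount (c v N : ℕ) (hc : 0 < c) (hvN : v / c ≤ N) :
    v / c = ∑ t ∈ Finset.range N, if c * (t + 1) ≤ v then 1 else 0 := by
  have key : ∀ t, (c * (t + 1) ≤ v) ↔ t < v / c := by
    intro t
    rw [Nat.lt_iff_add_one_le, Nat.le_div_iff_mul_le hc, mul_comm]
  calc v / c = (Finset.range (v / c)).card := (Finset.card_range _).symm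
    _ = ({t ∈ Finset.range N | c * (t + 1) ≤ v}).card := by
        congr 1
        ext t
        simp only [Finset.mem_filter, Finset.mem_range, key]
        omega
    _ = ∑ t ∈ Finset.range N, if c * (t + 1) ≤ v then 1 else 0 := Finset.card_filter _ _

-- The core lattice-point swap identity, in ℕ.
theorem pvSwapNat (M A B n : ℕ) (hA : A < M) (hB : B < M) (hy : M ≤ A * n + B) :
    ∑ i ∈ Finset.range n, (A * i + B) / M
      = ∑ j ∈ Finset.range ((A * n + B) / M), (M * j + (A * n + B) % M) / A := by
  set y := A * n + B with hy0
  set Y := y / M with hY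
  set yr := y % M with hyr
  have hM : 0 < M := by omega
  have hApos : 0 < A := by
    rcases Nat.eq_zero_or_pos A with h | h
    · subst h; simp only [hy0, Nat.zero_mul, Nat.zero_add] at hy; omega
    · exact h
  have hnpos : 0 < n := by
    rcases Nat.eq_zero_or_pos n with h | h
    · subst h; simp only [hy0, Nat.mul_zero, Nat.zero_add] at hy; omega
    · exact h
  have hYpos : 0 < Y := Nat.div_pos hy hM
  have hdm : M * Y + yr = A * n + B := by
    rw [hY, hyr]; exact Nat.div_add_mod y M
  have hterm1 : ∀ i ∈ Finset.range n, (A * i + B) / M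
      = ∑ t ∈ Finset.range Y, if M * (t + 1) ≤ A * i + B then 1 else 0 := by
    intro i hi
    simp only [Finset.mem_range] at hi
    apply pvCount _ _ _ hM
    apply Nat.div_le_div_right
    have : A * i ≤ A * n := Nat.mul_le_mul_left _ (le_of_lt hi)
    omega
  have hterm2 : ∀ j ∈ Finset.range Y, (M * j + yr) / A
      = ∑ x ∈ Finset.range n, if A * (x + 1) ≤ M * j + yr then 1 else 0 := by
    intro j hj
    simp only [Finset.mem_range] at hj
    apply pvCount _ _ _ hApos
    have h1 : M * (j + 1) ≤ M * Y := Nat.mul_le_mul_left _ (by omega)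
    have h2 : M * (j + 1) = M * j + M := by ring
    have hc : A * n = n * A := Nat.mul_comm A n
    have hlt : M * j + yr < n * A := by omega
    have := (Nat.div_lt_iff_lt_mul hApos).2 hlt
    omega
  rw [Finset.sum_congr rfl hterm1, Finset.sum_congr rfl hterm2]
  rw [← Finset.sum_product' (Finset.range n) (Finset.range Y)
        (fun i t => if M * (t + 1) ≤ A * i + B then 1 else 0),
      ← Finset.sum_product' (Finset.range Y) (Finset.range n)
        (fun j x => if A * (x + 1) ≤ M * j + yr then 1 else 0)]
  apply Finset.sum_nbij' (i := fun p => (Y - 1 - p.2, n - 1 - p.1))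
    (j := fun p => (n - 1 - p.2, Y - 1 - p.1))
  · intro a ha
    simp only [Finset.mem_product, Finset.mem_range] at ha ⊢
    omega
  · intro a ha
    simp only [Finset.mem_product, Finset.mem_range] at ha ⊢
    omega
  · intro a ha
    simp only [Finset.mem_product, Finset.mem_range] at ha
    obtain ⟨h1, h2⟩ := ha
    simp only [Prod.ext_iff]
    omega
  · intro a ha
    simp only [Finset.mem_product, Finset.mem_range] at ha
    obtain ⟨h1, h2⟩ := ha
    simp only [Prod.ext_iff]
    omega
  · rintro ⟨i, t⟩ ha
    simp only [Finset.mem_product, Finset.mem_range] at ha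
    obtain ⟨hi, ht⟩ := ha
    have e1 : A * (n - 1 - i + 1) = A * n - A * i := by
      rw [show n - 1 - i + 1 = n - i by omega, Nat.mul_sub]
    have e2 : M * (Y - 1 - t) = M * Y - M * (t + 1) := by
      rw [show Y - 1 - t = Y - (t + 1) by omega, Nat.mul_sub]
    have f1 : A * i ≤ A * n := Nat.mul_le_mul_left _ (le_of_lt hi)
    have f2 : M * (t + 1) ≤ M * Y := Nat.mul_le_mul_left _ (by omega)
    have hiff : (M * (t + 1) ≤ A * i + B) ↔ (A * (n - 1 - i + 1) ≤ M * (Y - 1 - t) + yr) := by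
      omega
    simp only [hiff]

-- the swap identity over ℤ
theorem pvSwapInt (m a b n : Int) (hm : 0 < m) (ha : 0 ≤ a) (ha2 : a < m)
    (hb : 0 ≤ b) (hb2 : b < m) (hn : 0 ≤ n) (hy : m ≤ a * n + b) :
    ∑ i ∈ Finset.range n.toNat, (a * (i : Int) + b) / m
      = ∑ j ∈ Finset.range ((a * n + b) / m).toNat, (m * (j : Int) + (a * n + b) % m) / a := by
  obtain ⟨M, rfl⟩ := Int.eq_ofNat_of_zero_le (le_of_lt hm)
  obtain ⟨A, rfl⟩ := Int.eq_ofNat_of_zero_le ha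
  obtain ⟨B, rfl⟩ := Int.eq_ofNat_of_zero_le hb
  obtain ⟨N, rfl⟩ := Int.eq_ofNat_of_zero_le hn
  have hA : A < M := by exact_mod_cast ha2
  have hB : B < M := by exact_mod_cast hb2
  have hy' : M ≤ A * N + B := by exact_mod_cast hy
  have hswap := pvSwapNat M A B N hA hB hy'
  have hcast1 : ∑ i ∈ Finset.range ((N : Int)).toNat, ((A : Int) * (i : Int) + B) / M
      = ((∑ i ∈ Finset.range N, (A * i + B) / M : ℕ) : Int) := by
    rw [Int.toNat_natCast, Nat.cast_sum]
    refine Finset.sum_congr rfl fun i _ => ?_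
    rw [Int.natCast_div]
    push_cast
    rfl
  have hYcast : (((A : Int) * (N : Int) + (B : Int)) / (M : Int)).toNat = (A * N + B) / M := by
    have : ((A : Int) * (N : Int) + (B : Int)) / (M : Int) = (((A * N + B) / M : ℕ) : Int) := by
      rw [Int.natCast_div]; push_cast; rfl
    rw [this, Int.toNat_natCast]
  have hrcast : ((A : Int) * (N : Int) + (B : Int)) % (M : Int) = (((A * N + B) % M : ℕ) : Int) := by
    rw [Int.natCast_mod]; push_cast; rfl
  have hcast2 : ∑ j ∈ Finset.range (((A : Int) * (N : Int) + (B : Int)) / (M : Int)).toNat,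
        ((M : Int) * (j : Int) + ((A : Int) * (N : Int) + (B : Int)) % (M : Int)) / (A : Int)
      = ((∑ j ∈ Finset.range ((A * N + B) / M), (M * j + (A * N + B) % M) / A : ℕ) : Int) := by
    rw [hYcast, Nat.cast_sum]
    refine Finset.sum_congr rfl fun j _ => ?_
    rw [hrcast, Int.natCast_div]
    push_cast
    rfl
  rw [hcast1, hcast2, hswap]

-- all floors vanish when the whole range stays below m
theorem pvTermZero (m a b n : Int) (ha : 0 ≤ a) (hb : 0 ≤ b) (hn : 0 ≤ n)
    (hy : a * n + b < m) :
    ∑ i ∈ Finset.range n.toNat, (a * (i : Int) + b) / m = 0 := by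
  apply Finset.sum_eq_zero
  intro i hi
  simp only [Finset.mem_range] at hi
  have hin : (i : Int) ≤ n := by
    have : (i : Int) < (n.toNat : Int) := by exact_mod_cast hi
    omega
  have h1 : a * (i : Int) ≤ a * n := mul_le_mul_of_nonneg_left hin ha
  have h2 : 0 ≤ a * (i : Int) := mul_nonneg ha (by positivity)
  exact Int.ediv_eq_zero_of_lt (by omega) (by omega)

-- pulling the div/mod reduction of a and b out of the sum
theorem pvStep (m a b n : Int) (hm : 0 < m) (hn : 0 ≤ n) :
    ∑ i ∈ Finset.range n.toNat, (a * (i : Int) + b) / m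
      = (a / m) * ((n * (n - 1)) / 2) + (b / m) * n
        + ∑ i ∈ Finset.range n.toNat, ((a % m) * (i : Int) + (b % m)) / m := by
  have hterm : ∀ i : ℕ, (a * (i : Int) + b) / m
      = ((a % m) * (i : Int) + (b % m)) / m + ((a / m) * (i : Int) + b / m) := by
    intro i
    have h1 : a * (i : Int) + b = (a % m) * (i : Int) + (b % m) + ((a / m) * (i : Int) + b / m) * m := by
      rw [Int.emod_def, Int.emod_def]
      ring
    rw [h1, Int.add_mul_ediv_right _ _ (ne_of_gt hm)]
  rw [Finset.sum_congr rfl (fun i _ => hterm i), Finset.sum_add_distrib]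
  have h2 : ∑ i ∈ Finset.range n.toNat, ((a / m) * (i : Int) + b / m)
      = (a / m) * ((n * (n - 1)) / 2) + (b / m) * n := by
    rw [Finset.sum_add_distrib, ← Finset.mul_sum, pvGauss n hn, Finset.sum_const,
        Finset.card_range, nsmul_eq_mul, Int.toNat_of_nonneg hn]
    ring
  rw [h2]
  ring


-- branch assembly: final range already below m, all floors vanish
theorem pvFinishLow (m a b n : Int) (hm : 0 < m) (hn : 0 ≤ n)
    {a1 b1 C : Int} (h3 : a1 * n + b1 < m)
    (ha1 : a1 = a % m) (hb1 : b1 = b % m)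
    (hC : C = (a / m) * ((n * (n - 1)) / 2) + (b / m) * n) :
    C = ∑ i ∈ Finset.range n.toNat, (a * (i : Int) + b) / m := by
  subst ha1 hb1 hC
  rw [pvStep m a b n hm hn,
      pvTermZero m (a % m) (b % m) n (Int.emod_nonneg a (ne_of_gt hm))
        (Int.emod_nonneg b (ne_of_gt hm)) hn h3]
  ring

-- branch assembly: recursive case, using the IH and the swap identity
theorem pvFinishHigh (fuel : ℕ)
    (ih : ∀ m' : Int, m'.natAbs < fuel → 0 < m' → ∀ n a b : Int, 0 ≤ n →
      pyFloorSumGo fuel n m' a b = ∑ i ∈ Finset.range n.toNat, (a * (i : Int) + b) / m')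
    (m a b n : Int) (hm : 0 < m) (hKm : m.natAbs ≤ fuel) (hn : 0 ≤ n)
    {a1 b1 C : Int} (h3 : ¬ a1 * n + b1 < m)
    (ha1 : a1 = a % m) (hb1 : b1 = b % m)
    (hC : C = (a / m) * ((n * (n - 1)) / 2) + (b / m) * n) :
    C + pyFloorSumGo fuel ((a1 * n + b1) / m) a1 m ((a1 * n + b1) % m)
      = ∑ i ∈ Finset.range n.toNat, (a * (i : Int) + b) / m := by
  subst ha1 hb1 hC
  push_neg at h3
  have ham : 0 ≤ a % m := Int.emod_nonneg a (ne_of_gt hm)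
  have ham2 : a % m < m := Int.emod_lt_of_pos a hm
  have hbm : 0 ≤ b % m := Int.emod_nonneg b (ne_of_gt hm)
  have hbm2 : b % m < m := Int.emod_lt_of_pos b hm
  have hy0 : 0 ≤ a % m * n + b % m := by positivity
  have hapos : 0 < a % m := by
    rcases lt_or_eq_of_le ham with h | h
    · exact h
    · exfalso
      have : a % m * n = 0 := by rw [← h]; ring
      omega
  have hYn : 0 ≤ (a % m * n + b % m) / m := Int.ediv_nonneg hy0 (le_of_lt hm)
  have hrec := ih (a % m) (by omega) hapos ((a % m * n + b % m) / m) m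
    ((a % m * n + b % m) % m) hYn
  have hswap := pvSwapInt m (a % m) (b % m) n hm ham ham2 hbm hbm2 hn h3
  rw [pvStep m a b n hm hn, hrec]
  linarith [hswap]

-- Correctness of the Euclidean floor-sum recursion.
theorem pvFloorSumGo_eq (fuel : ℕ) : ∀ (m : Int), m.natAbs < fuel → 0 < m →
    ∀ (n a b : Int), 0 ≤ n →
    pyFloorSumGo fuel n m a b = ∑ i ∈ Finset.range n.toNat, (a * (i : Int) + b) / m := by
  induction fuel with
  | zero => intro m hK hm; omega
  | succ K ih =>
    intro m hK hm n a b hn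
    have hK' : m.natAbs ≤ K := by omega
    rw [pyFloorSumGo]
    rw [if_neg (by omega : ¬ m ≤ 0)]
    simp only [PySem.Int.floordiv_eq_ediv_of_pos hm, PySem.Int.mod_eq_emod_of_pos hm,
      PySem.Int.floordiv_eq_ediv_of_pos (show (0:Int) < 2 by norm_num)]
    split_ifs with h1 h2 h3 h3 h2 h3 h3
    · exact pvFinishLow m a b n hm hn h3 rfl rfl rfl
    · exact pvFinishHigh K ih m a b n hm hK' hn h3 rfl rfl rfl
    · have hb0 : 0 ≤ b := by omega
      have hb2 : b < m := by omega
      refine pvFinishLow m a b n hm hn h3 rfl (Int.emod_eq_of_lt hb0 hb2).symm ?_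
      rw [Int.ediv_eq_zero_of_lt hb0 hb2]
      ring
    · have hb0 : 0 ≤ b := by omega
      have hb2 : b < m := by omega
      refine pvFinishHigh K ih m a b n hm hK' hn h3 rfl (Int.emod_eq_of_lt hb0 hb2).symm ?_
      rw [Int.ediv_eq_zero_of_lt hb0 hb2]
      ring
    · have ha0 : 0 ≤ a := by omega
      have ha2 : a < m := by omega
      refine pvFinishLow m a b n hm hn h3 (Int.emod_eq_of_lt ha0 ha2).symm rfl ?_
      rw [Int.ediv_eq_zero_of_lt ha0 ha2]
      ring
    · have ha0 : 0 ≤ a := by omega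
      have ha2 : a < m := by omega
      refine pvFinishHigh K ih m a b n hm hK' hn h3 (Int.emod_eq_of_lt ha0 ha2).symm rfl ?_
      rw [Int.ediv_eq_zero_of_lt ha0 ha2]
      ring
    · have ha0 : 0 ≤ a := by omega
      have ha2 : a < m := by omega
      have hb0 : 0 ≤ b := by omega
      have hb2 : b < m := by omega
      refine pvFinishLow m a b n hm hn h3 (Int.emod_eq_of_lt ha0 ha2).symm
        (Int.emod_eq_of_lt hb0 hb2).symm ?_
      rw [Int.ediv_eq_zero_of_lt ha0 ha2, Int.ediv_eq_zero_of_lt hb0 hb2]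
      ring
    · have ha0 : 0 ≤ a := by omega
      have ha2 : a < m := by omega
      have hb0 : 0 ≤ b := by omega
      have hb2 : b < m := by omega
      refine pvFinishHigh K ih m a b n hm hK' hn h3 (Int.emod_eq_of_lt ha0 ha2).symm
        (Int.emod_eq_of_lt hb0 hb2).symm ?_
      rw [Int.ediv_eq_zero_of_lt ha0 ha2, Int.ediv_eq_zero_of_lt hb0 hb2]
      ring

theorem pvFloorSumB_eq (m : Int) (hm : 0 < m) (n a b : Int) (hn : 0 ≤ n) :
    pyFloorSumB n m a b = ∑ i ∈ Finset.range n.toNat, (a * (i : Int) + b) / m :=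
  pvFloorSumGo_eq (m.natAbs + 1) m (by omega) hm n a b hn

theorem pvModSumB_eq (p q r n : Int) (hr : 0 < r) (hn : 0 ≤ n) :
    pyModSumB p q r n = ∑ i ∈ Finset.range n.toNat, PySem.Int.mod ((i : Int) * p + q) r := by
  unfold pyModSumB
  rw [PySem.Int.floordiv_eq_ediv_of_pos (show (0:Int) < 2 by norm_num),
      pvFloorSumB_eq r hr n p q hn]
  have hterm : ∀ i : ℕ, PySem.Int.mod ((i : Int) * p + q) r
      = (p * (i : Int) + q) - r * ((p * (i : Int) + q) / r) := by
    intro i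
    rw [show (i : Int) * p + q = p * (i : Int) + q by ring,
        PySem.Int.mod_eq_emod_of_pos hr, Int.emod_def]
  rw [Finset.sum_congr rfl (fun i _ => hterm i), Finset.sum_sub_distrib,
      Finset.sum_add_distrib, ← Finset.mul_sum, ← Finset.mul_sum, pvGauss n hn,
      Finset.sum_const, Finset.card_range, nsmul_eq_mul, Int.toNat_of_nonneg hn]
  ring

-- ===== VERDICT (by name: the statement is the Claim_ definition above) =====
theorem func_52bc3fb7c58c4b9faa78d9f42ca9a8cd_spec : Claim_equal_func_52bc3fb7c58c4b9faa78d9f42ca9a8cd := by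
  intro s p r n q _hdom hpre
  unfold Spec_func_52bc3fb7c58c4b9faa78d9f42ca9a8cd
  have hA : func_52bc3fb7c58c4b9faa78d9f42ca9a8cd s p r n q
      = ((PySem.List.pyRange 0 n 1).map (fun i => PySem.Int.mod (i * p + q) r + s)).foldl (· + ·) 0 := rfl
  rw [hA]
  by_cases hn : n ≤ 0
  · rw [PySem.List.pyRange_one_eq_nil hn]
    simp [func_52bc3fb7c58c4b9faa78d9f42ca9a8cd_alt, hn]
  · push_neg at hn
    have hn0 : 0 ≤ n := le_of_lt hn
    have hr0 : r ≠ 0 := by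
      rcases hpre with h | h
      · omega
      · exact h
    have hB : func_52bc3fb7c58c4b9faa78d9f42ca9a8cd_alt s p r n q
        = (if r < 0 then -(pyModSumB (-p) (-q) (-r) n) else pyModSumB p q r n) + s * n := by
      simp only [func_52bc3fb7c58c4b9faa78d9f42ca9a8cd_alt, if_neg (show ¬ n ≤ 0 by omega)]
    rw [hB, ← List.sum_eq_foldl]
    simp only [pvSumPyRange n (fun i => PySem.Int.mod (i * p + q) r + s)]
    rw [Finset.sum_add_distrib, Finset.sum_const, Finset.card_range, nsmul_eq_mul,
        Int.toNat_of_nonneg hn0]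
    by_cases hrneg : r < 0
    · rw [if_pos hrneg]
      have hterm : ∀ i : ℕ, PySem.Int.mod ((i : Int) * p + q) r
          = -(PySem.Int.mod ((i : Int) * (-p) + (-q)) (-r)) := by
        intro i
        have h := PySem.Int.mod_neg_neg ((i : Int) * (-p) + (-q)) (-r)
        rw [show -((i : Int) * (-p) + (-q)) = (i : Int) * p + q by ring, neg_neg] at h
        rw [h]
      rw [Finset.sum_congr rfl (fun i _ => hterm i), Finset.sum_neg_distrib,
          pvModSumB_eq (-p) (-q) (-r) n (by omega) hn0]
      ring
    · have hrpos : 0 < r := by omega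
      rw [if_neg hrneg, pvModSumB_eq p q r n hrpos hn0]
      ring
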